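-- pv_equiv track=rewrite | github.com/Jrgil20/EducationalCodeforces168-Div.2 | aStrongPaswword.py | calcular_tiempo_de_escritura
-- ===== SOURCE A (Python) =====
-- def calcular_tiempo_de_escritura(s):
--     # Tiempo para escribir el primer carácter
--     tiempo = 2
--     # Iterar sobre cada carácter en la cadena a partir del segundo
--     for i in range(1, len(s)):
--         if s[i] == s[i - 1]:
--             # Si el carácter es el mismo que el anterior, toma 1 segundo
--             tiempo += 1
--         else:
--             # Si el carácter es diferente al anterior, toma 2 segundos
--             tiempo += 2
--     return tiempo
-- ===== SOURCE B (Python) =====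
-- def calcular_tiempo_de_escritura(s):
--     # Run-length view: a maximal run of k equal characters takes k+1 seconds
--     # (2 for its first character, 1 for each repeat), so the total time is
--     # len(s) + number of runs.  The empty string naturally takes 0 seconds.
--     n = len(s)
--     runs = 0
--     i = 0
--     while i < n:
--         c = s[i]
--         while i < n and s[i] == c:
--             i += 1
--         runs += 1
--     return n + runs
-- ===== Notes on version B (the rewrite author's own statement) =====
-- stated objective: alternative
-- what changed: Views the string as maximal runs of equal characters (scanned with a nested run-skipping loop) and returns len(s) + number-of-runs, instead of A's per-character accumulator that adds 1 or 2 per step.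
-- intended difference: On the empty string A returns 2 (it charges for a nonexistent first character) while B returns 0, the intended time to type nothing; everywhere else they agree. — e.g. on calcular_tiempo_de_escritura(""): A returns 2, B returns 0
import Mathlib
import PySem

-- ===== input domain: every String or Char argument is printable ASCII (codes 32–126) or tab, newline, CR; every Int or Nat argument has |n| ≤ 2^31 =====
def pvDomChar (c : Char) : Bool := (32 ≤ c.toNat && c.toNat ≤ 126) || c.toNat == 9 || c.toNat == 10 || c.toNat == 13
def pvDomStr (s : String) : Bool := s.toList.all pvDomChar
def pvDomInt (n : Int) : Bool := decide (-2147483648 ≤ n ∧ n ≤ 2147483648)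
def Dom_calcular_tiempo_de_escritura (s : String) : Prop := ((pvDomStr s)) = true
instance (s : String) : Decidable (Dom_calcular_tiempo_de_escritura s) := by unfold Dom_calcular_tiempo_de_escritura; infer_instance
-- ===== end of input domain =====

-- B recomputes the time from the run-length structure (len(s) + number of maximal runs)
-- instead of A's per-character branching accumulator; on "" B returns the intended 0 where A returns 2.

-- ===== PORT A =====
-- literal port of A: tiempo starts at 2; for i in range(1, len(s)): compare s[i] with s[i-1]
def calcular_tiempo_de_escritura (s : String) : Int :=
  (PySem.List.pyRange 1 (PySem.Str.len s) 1).foldl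
    (fun tiempo i =>
      if PySem.Str.pyGet? s i = PySem.Str.pyGet? s (i - 1) then tiempo + 1 else tiempo + 2)
    2

-- ===== PORT B =====
-- port of B's outer while loop counting maximal runs; the inner while loop that
-- skips past the current run's equal characters is the dropWhile step
def pvRuns : List Char → Nat
  | [] => 0
  | c :: t => 1 + pvRuns (t.dropWhile (· == c))
termination_by l => l.length
decreasing_by
  have := List.length_dropWhile_le (· == c) t
  simp only [List.length_cons]
  omega

def calcular_tiempo_de_escritura_alt (s : String) : Int :=
  (s.toList.length : Int) + (pvRuns s.toList : Int)

-- ===== PRECONDITION & SPEC =====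
-- On the empty string A returns 2 (it charges for a nonexistent first character)
-- while B returns the intended 0; they agree on every other input.
def D_calcular_tiempo_de_escritura (s : String) : Prop := s = ""
instance (s : String) : Decidable (D_calcular_tiempo_de_escritura s) := by unfold D_calcular_tiempo_de_escritura; infer_instance

def Spec_calcular_tiempo_de_escritura (s : String) (out : Int) : Prop := ¬ D_calcular_tiempo_de_escritura s → out = calcular_tiempo_de_escritura_alt s
instance (s : String) (out : Int) : Decidable (Spec_calcular_tiempo_de_escritura s out) := by unfold Spec_calcular_tiempo_de_escritura; infer_instance

def pvDiffWitness_calcular_tiempo_de_escritura : String := ""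
def pvDiffWitnessOut_calcular_tiempo_de_escritura : Int × Int := (2, 0)

-- ===== CLAIM (what is proved, stated in full; the proofs are below) =====
def Claim_unchanged_calcular_tiempo_de_escritura : Prop := ∀ (s : String), Dom_calcular_tiempo_de_escritura s → Spec_calcular_tiempo_de_escritura s (calcular_tiempo_de_escritura s)
def Claim_changed_calcular_tiempo_de_escritura : Prop := Dom_calcular_tiempo_de_escritura (pvDiffWitness_calcular_tiempo_de_escritura) ∧ D_calcular_tiempo_de_escritura (pvDiffWitness_calcular_tiempo_de_escritura) ∧ calcular_tiempo_de_escritura (pvDiffWitness_calcular_tiempo_de_escritura) = pvDiffWitnessOut_calcular_tiempo_de_escritura.1 ∧ calcular_tiempo_de_escritura_alt (pvDiffWitness_calcular_tiempo_de_escritura) = pvDiffWitnessOut_calcular_tiempo_de_escritura.2 ∧ pvDiffWitnessOut_calcular_tiempo_de_escritura.1 ≠ pvDiffWitnessOut_calcular_tiempo_de_escritura.2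
def Claim_exact_calcular_tiempo_de_escritura : Prop := ∀ (s : String), Dom_calcular_tiempo_de_escritura s → D_calcular_tiempo_de_escritura s → calcular_tiempo_de_escritura s ≠ calcular_tiempo_de_escritura_alt s

-- ===== LEMMAS AND PROOFS =====

lemma pvRuns_nil : pvRuns [] = 0 := by simp [pvRuns]

lemma pvRuns_cons (c : Char) (t : List Char) :
    pvRuns (c :: t) = 1 + pvRuns (t.dropWhile (· == c)) := by simp [pvRuns]

-- per-step cost of A; A's fold is 2 + the sum of this over zip(l, l.tail)
def pvCost (p : Char × Char) : Int := if p.1 = p.2 then 1 else 2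

lemma pvA_eq_sum (l : List Char) :
    (PySem.List.pyRange 1 (l.length : Int) 1).foldl
      (fun tiempo i =>
        if PySem.List.pyGet? l i = PySem.List.pyGet? l (i - 1) then tiempo + 1 else tiempo + 2)
      2
    = 2 + ((l.zip l.tail).map pvCost).sum := by
  have hstep : (fun (t : Int) i =>
      if PySem.List.pyGet? l i = PySem.List.pyGet? l (i - 1) then t + 1 else t + 2)
      = fun t i => t + (if PySem.List.pyGet? l i = PySem.List.pyGet? l (i - 1) then (1:Int) else 2) := by
    funext t i; split_ifs <;> ring
  rw [hstep, PySem.List.foldl_add]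
  congr 1
  refine congrArg (List.sum (α := Int)) ?_
  apply List.ext_getElem
  · simp [PySem.List.length_pyRange_one, List.length_zip]
  · intro k hk1 hk2
    have hk : k + 1 < l.length := by
      simp [List.length_zip] at hk2; omega
    simp only [List.getElem_map, PySem.List.getElem_pyRange_one, List.getElem_zip, pvCost,
      List.getElem_tail]
    have h1 : (1 : Int) + (k : Int) = ((k + 1 : Nat) : Int) := by push_cast; ring
    rw [h1]
    rw [show ((k + 1 : Nat) : Int) - 1 = ((k : Nat) : Int) by push_cast; ring]
    rw [PySem.List.pyGet?_natCast, PySem.List.pyGet?_natCast]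
    rw [List.getElem?_eq_getElem hk, List.getElem?_eq_getElem (by omega : k < l.length)]
    simp only [Option.some.injEq, eq_comm]

-- the adjacent-pair cost sum, expressed through the run structure
lemma pvSum_eq_runs : ∀ (l : List Char), l ≠ [] →
    ((l.zip l.tail).map pvCost).sum = (l.length : Int) + (pvRuns l : Int) - 2 := by
  intro l
  induction l with
  | nil => intro h; exact absurd rfl h
  | cons c t ih =>
    intro _
    cases t with
    | nil => simp [pvRuns_cons, pvRuns_nil]
    | cons d t' =>
      have ihne := ih (by simp)
      simp only [List.zip_cons_cons, List.tail_cons, List.map_cons, List.sum_cons] at *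
      rw [ihne]
      by_cases h : c = d
      · subst h
        simp only [pvCost]
        rw [pvRuns_cons, pvRuns_cons]
        simp only [List.dropWhile_cons, beq_self_eq_true, if_true]
        simp only [List.length_cons]
        push_cast
        ring
      · simp only [pvCost, if_neg h]
        rw [pvRuns_cons c (d :: t')]
        have hd : ((d :: t').dropWhile (· == c)) = d :: t' := by
          simp [Ne.symm h]
        rw [hd]
        simp only [List.length_cons]
        push_cast
        ring

-- ===== VERDICT (by name: the statement is the Claim_ definition above) =====
theorem calcular_tiempo_de_escritura_spec : Claim_unchanged_calcular_tiempo_de_escritura := by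
  intro s _ hD
  unfold calcular_tiempo_de_escritura calcular_tiempo_de_escritura_alt
  simp only [PySem.Str.len_eq, PySem.Str.pyGet?_eq, PySem.Chars.pyGet?_eq_listPyGet?]
  have hne : s.toList ≠ [] := by
    intro h
    exact hD (String.toList_eq_nil_iff.mp h)
  have h2 : (s.toList.length : Int) + (pvRuns s.toList : Int)
      = 2 + ((s.toList.zip s.toList.tail).map pvCost).sum := by
    rw [pvSum_eq_runs s.toList hne]; ring
  rw [h2]
  exact pvA_eq_sum s.toList

theorem calcular_tiempo_de_escritura_changed : Claim_changed_calcular_tiempo_de_escritura := by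
  unfold Claim_changed_calcular_tiempo_de_escritura
  refine ⟨by decide, rfl, by decide, ?_, by decide⟩
  simp [calcular_tiempo_de_escritura_alt, pvDiffWitness_calcular_tiempo_de_escritura,
    pvDiffWitnessOut_calcular_tiempo_de_escritura, pvRuns_nil]

theorem calcular_tiempo_de_escritura_tight : Claim_exact_calcular_tiempo_de_escritura := by
  intro s _ hD
  subst hD
  have hA : calcular_tiempo_de_escritura "" = 2 := by decide
  have hB : calcular_tiempo_de_escritura_alt "" = 0 := by
    simp [calcular_tiempo_de_escritura_alt, pvRuns_nil]
  rw [hA, hB]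
  decide
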